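-- pv_equiv track=rewrite | github.com/barun-saha/ns2web | ns2trace/metrics.py | packet_retransmissions
-- ===== SOURCE A (Python) =====
-- def packet_retransmissions(send_pkts_list=None):
--     #print 'Packet retransmissions'
--
--     send_pkts = {}
--
--     send_pkts_list = [ int(item) for item in send_pkts_list ]
--
--     for seq_num in send_pkts_list:
--         if seq_num in send_pkts:
--             send_pkts[seq_num] += 1
--         else:
--             send_pkts[seq_num] = 0
--
--     pkt_retransmits = []
--
--     for (seq_num, retransmits) in send_pkts.items():
--         if retransmits != 0:
--             pkt_retransmits.append( (seq_num, retransmits) )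
--
--     pkt_retransmits.sort()
--     return pkt_retransmits
-- ===== SOURCE B (Python) =====
-- def packet_retransmissions(send_pkts_list=None):
--     # Sort once, then one pass over runs of equal values: a run of length L
--     # at value v means L - 1 retransmissions of v; the pre-sort makes the
--     # result already ascending, so no dict and no final sort.
--     seqs = sorted(int(item) for item in send_pkts_list)
--     result = []
--     i = 0
--     n = len(seqs)
--     while i < n:
--         j = i + 1
--         while j < n and seqs[j] == seqs[i]:
--             j += 1
--         if j - i > 1:
--             result.append((seqs[i], j - i - 1))
--         i = j
--     return result
-- ===== Notes on version B (the rewrite author's own statement) =====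
-- stated objective: alternative
-- what changed: Replaces the dict-of-counts plus filter plus final sort with sort-first and a single adjacent-run scan: each run of equal values of length L > 1 emits (value, L-1), already in ascending order so no dict and no final sort.
import Mathlib
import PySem

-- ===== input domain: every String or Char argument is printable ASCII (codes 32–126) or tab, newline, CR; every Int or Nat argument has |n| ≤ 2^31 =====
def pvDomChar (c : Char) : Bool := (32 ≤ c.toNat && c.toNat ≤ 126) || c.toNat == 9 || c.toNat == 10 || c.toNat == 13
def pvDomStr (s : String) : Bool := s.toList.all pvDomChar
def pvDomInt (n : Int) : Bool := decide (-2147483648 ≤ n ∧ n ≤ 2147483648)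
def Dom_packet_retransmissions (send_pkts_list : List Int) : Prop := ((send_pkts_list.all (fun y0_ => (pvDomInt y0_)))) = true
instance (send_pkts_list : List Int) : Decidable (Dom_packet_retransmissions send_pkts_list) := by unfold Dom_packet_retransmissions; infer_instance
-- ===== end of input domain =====

-- B replaces A's dict-of-counts + filter + final sort by sort-first and a single
-- adjacent-run scan (equal cost; objective: alternative algorithm).


-- ===== PORT A =====
def packet_retransmissions (send_pkts_list : List Int) : List (Int × Int) :=
  let send_pkts : PySem.Dict Int Int := PySem.Dict.empty
  let send_pkts_list := send_pkts_list.map (fun item => item)  -- [int(item) for item in send_pkts_list]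
  let send_pkts := send_pkts_list.foldl
    (fun d seq_num =>
      if d.contains seq_num then d.insert seq_num (d.getD seq_num 0 + 1)  -- send_pkts[seq_num] += 1
      else d.insert seq_num 0) send_pkts                                  -- send_pkts[seq_num] = 0
  let pkt_retransmits : List (Int × Int) := []
  let pkt_retransmits := send_pkts.items.foldl
    (fun acc p => if p.2 ≠ 0 then acc ++ [p] else acc) pkt_retransmits
  PySem.List.sorted2 pkt_retransmits (fun p => p.1) (fun p => p.2)        -- pkt_retransmits.sort()

-- ===== PORT B =====
-- the while-loop over runs of equal values in the sorted list (i is the head, j - i = 1 + run length)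
def pvRuns : List Int → List (Int × Int)
  | [] => []
  | x :: t =>
    let j : Int := (t.takeWhile (fun y => y == x)).length + 1
    (if j > 1 then [(x, j - 1)] else []) ++ pvRuns (t.dropWhile (fun y => y == x))
termination_by s => s.length
decreasing_by
  exact Nat.lt_succ_of_le (t.dropWhile_sublist (fun y => y == x)).length_le

def packet_retransmissions_alt (send_pkts_list : List Int) : List (Int × Int) :=
  pvRuns (PySem.List.sorted (send_pkts_list.map (fun item => item)) (fun x => x))

-- ===== PRECONDITION & SPEC =====
def Spec_packet_retransmissions (send_pkts_list : List Int) (out : List (Int × Int)) : Prop := out = packet_retransmissions_alt send_pkts_list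
instance (send_pkts_list : List Int) (out : List (Int × Int)) : Decidable (Spec_packet_retransmissions send_pkts_list out) := by unfold Spec_packet_retransmissions; infer_instance

-- ===== CLAIM (what is proved, stated in full; the proofs are below) =====
def Claim_equal_packet_retransmissions : Prop := ∀ (send_pkts_list : List Int), Dom_packet_retransmissions send_pkts_list → Spec_packet_retransmissions send_pkts_list (packet_retransmissions send_pkts_list)

-- ===== LEMMAS AND PROOFS =====

-- A's counting loop: the stored value is (occurrences so far) - 1
theorem pv_getD_foldA (l : List Int) : ∀ (d : PySem.Dict Int Int) (v : Int),
    (l.foldl (fun d seq_num =>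
      if d.contains seq_num then d.insert seq_num (d.getD seq_num 0 + 1)
      else d.insert seq_num 0) d).getD v (-1) = d.getD v (-1) + l.count v := by
  induction l with
  | nil => intro d v; simp
  | cons x l ih =>
    intro d v
    rw [List.foldl_cons, ih, List.count_cons]
    have hstep : ((if d.contains x then d.insert x (d.getD x 0 + 1)
        else d.insert x 0)).getD v (-1)
        = d.getD v (-1) + (if v == x then 1 else 0) := by
      by_cases hv : v = x
      · subst hv
        by_cases hc : d.contains v = true
        · obtain ⟨w, hw⟩ : ∃ w, d.get? v = some w := by
            rw [← Option.isSome_iff_exists, ← PySem.Dict.contains_eq_isSome_get?]; exact hc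
          simp [hc, PySem.Dict.getD_eq_get?_getD, hw]
        · have hc' : d.contains v = false := by simpa using hc
          simp [hc', PySem.Dict.getD_of_not_contains d (-1) hc']
      · by_cases hc : d.contains x = true <;>
          simp [hc, PySem.Dict.getD_insert, hv]
    rw [hstep]
    by_cases hv : v = x <;> simp [hv] <;> omega

-- the branching step is one insert with a branched value
theorem pv_stepA_eq : (fun (d : PySem.Dict Int Int) seq_num =>
      if d.contains seq_num then d.insert seq_num (d.getD seq_num 0 + 1)
      else d.insert seq_num 0)
    = (fun d seq_num => d.insert seq_num
        (if d.contains seq_num then d.getD seq_num 0 + 1 else 0)) := by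
  funext d x
  by_cases h : d.contains x <;> simp [h]

theorem pv_keys_foldA (xs : List Int) :
    (xs.foldl (fun d seq_num =>
      if d.contains seq_num then d.insert seq_num (d.getD seq_num 0 + 1)
      else d.insert seq_num 0) (PySem.Dict.empty : PySem.Dict Int Int)).keys = PySem.Set.ofList xs := by
  simp only [pv_stepA_eq]
  rw [PySem.Dict.keys_foldl_insert]
  simp [PySem.Set.update_nil_left]

theorem pv_items_foldA (xs : List Int) :
    (xs.foldl (fun d seq_num =>
      if d.contains seq_num then d.insert seq_num (d.getD seq_num 0 + 1)
      else d.insert seq_num 0) (PySem.Dict.empty : PySem.Dict Int Int)).items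
    = (PySem.Set.ofList xs).map (fun k => (k, (-1 : Int) + xs.count k)) := by
  rw [PySem.Dict.items_eq_map_keys _ (by rw [pv_keys_foldA]; exact PySem.Set.nodup_ofList xs) (-1)]
  rw [pv_keys_foldA]
  apply List.map_congr_left
  intro k _
  rw [pv_getD_foldA]
  simp

-- the append-if loop is filter
theorem pv_filter_loop (l : List (Int × Int)) :
    l.foldl (fun acc (p : Int × Int) => if p.2 ≠ 0 then acc ++ [p] else acc) []
    = l.filter (fun p => decide (p.2 ≠ 0)) := by
  have h := PySem.List.foldl_append_if (fun p : Int × Int => decide (p.2 ≠ 0)) id l []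
  simpa using h

-- ===== pvRuns on a sorted list: characterisation =====

theorem pv_mem_dropWhile_ne (x : Int) (t : List Int) (ht : t.Pairwise (· ≤ ·))
    (hxle : ∀ k ∈ t, x ≤ k) : x ∉ t.dropWhile (fun y => y == x) := by
  intro hx
  cases hdw : t.dropWhile (fun y => y == x) with
  | nil => rw [hdw] at hx; simp at hx
  | cons y t2 =>
    have hy : ¬ (y == x) = true := by
      have := List.head_dropWhile_not (fun y => y == x) (l := t) (by simp [hdw])
      simpa [hdw] using this
    simp only [beq_iff_eq] at hy
    rw [hdw] at hx
    have hsub : (y :: t2).Sublist t := hdw ▸ t.dropWhile_sublist _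
    have hxy : x ≤ y := hxle y (hsub.mem List.mem_cons_self)
    rcases List.mem_cons.mp hx with h | h
    · exact hy h.symm
    · have hp2 : (y :: t2).Pairwise (· ≤ ·) := ht.sublist hsub
      have hyx : y ≤ x := (List.pairwise_cons.mp hp2).1 x h
      exact hy (le_antisymm hyx hxy)

theorem pv_count_head (x : Int) (t : List Int) (ht : t.Pairwise (· ≤ ·))
    (hxle : ∀ k ∈ t, x ≤ k) :
    (x :: t).count x = (t.takeWhile (fun y => y == x)).length + 1 := by
  have h1 : (t.takeWhile (fun y => y == x)).count x = (t.takeWhile (fun y => y == x)).length := by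
    rw [List.count_eq_length]
    intro b hb
    have := List.mem_takeWhile_imp hb
    simp only [beq_iff_eq] at this ⊢
    exact this.symm
  have h2 : (t.dropWhile (fun y => y == x)).count x = 0 :=
    List.count_eq_zero.mpr (pv_mem_dropWhile_ne x t ht hxle)
  have hsplit : t.count x
      = (t.takeWhile (fun y => y == x)).count x + (t.dropWhile (fun y => y == x)).count x := by
    conv_lhs => rw [← t.takeWhile_append_dropWhile (p := fun y => y == x)]
    rw [List.count_append]
  rw [List.count_cons_self]
  omega

theorem pv_count_tail (x k : Int) (t : List Int) (hk : k ≠ x) :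
    (x :: t).count k = (t.dropWhile (fun y => y == x)).count k := by
  have h1 : (t.takeWhile (fun y => y == x)).count k = 0 := by
    rw [List.count_eq_zero]
    intro hmem
    have := List.mem_takeWhile_imp hmem
    simp only [beq_iff_eq] at this
    exact hk this
  have hsplit : t.count k
      = (t.takeWhile (fun y => y == x)).count k + (t.dropWhile (fun y => y == x)).count k := by
    conv_lhs => rw [← t.takeWhile_append_dropWhile (p := fun y => y == x)]
    rw [List.count_append]
  rw [List.count_cons_of_ne (Ne.symm hk)]
  omega

theorem pv_mem_runs (s : List Int) (hs : s.Pairwise (· ≤ ·)) (p : Int × Int) :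
    p ∈ pvRuns s ↔ p.1 ∈ s ∧ 1 < s.count p.1 ∧ p.2 = (s.count p.1 : Int) - 1 := by
  obtain ⟨a, b⟩ := p
  dsimp only
  induction s using pvRuns.induct with
  | case1 => simp [pvRuns]
  | case2 x t ih =>
    have hxle : ∀ k ∈ t, x ≤ k := (List.pairwise_cons.mp hs).1
    have htp : t.Pairwise (· ≤ ·) := hs.of_cons
    have ht2 : (t.dropWhile (fun y => y == x)).Pairwise (· ≤ ·) :=
      htp.sublist (t.dropWhile_sublist _)
    have hxnot : x ∉ t.dropWhile (fun y => y == x) := pv_mem_dropWhile_ne x t htp hxle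
    have hcx : (x :: t).count x = (t.takeWhile (fun y => y == x)).length + 1 :=
      pv_count_head x t htp hxle
    rw [pvRuns]
    simp only [List.mem_append]
    rw [ih ht2]
    constructor
    · rintro (hl | hr)
      · have h0 : 0 < (t.takeWhile (fun y => y == x)).length ∧ a = x
            ∧ b = ((t.takeWhile (fun y => y == x)).length : Int) := by
          by_cases hgt : ((t.takeWhile (fun y => y == x)).length : Int) + 1 > 1
          · simp only [hgt, if_pos, List.mem_singleton, Prod.mk.injEq] at hl
            exact ⟨by omega, hl.1, by omega⟩
          · simp [hgt] at hl
        obtain ⟨h0, ha, hb⟩ := h0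
        refine ⟨by rw [ha]; exact List.mem_cons_self, ?_, ?_⟩
        · rw [ha, hcx]; omega
        · rw [ha, hcx, hb]; push_cast; omega
      · obtain ⟨hmem, hcnt, hval⟩ := hr
        have hne : a ≠ x := fun h => hxnot (h ▸ hmem)
        have hc : (x :: t).count a = (t.dropWhile (fun y => y == x)).count a :=
          pv_count_tail x a t hne
        exact ⟨List.mem_cons_of_mem _ ((t.dropWhile_sublist _).mem hmem), by omega,
          by rw [hc]; exact hval⟩
    · rintro ⟨hmem, hcnt, hval⟩
      by_cases hax : a = x
      · left
        rw [hax, hcx] at hcnt hval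
        have hgt : ((t.takeWhile (fun y => y == x)).length : Int) + 1 > 1 := by omega
        simp only [hgt, if_pos, List.mem_singleton, Prod.mk.injEq]
        exact ⟨hax, by rw [hval]; push_cast; omega⟩
      · right
        have hmt : a ∈ t := by
          rcases List.mem_cons.mp hmem with h | h
          · exact absurd h hax
          · exact h
        have hc : (x :: t).count a = (t.dropWhile (fun y => y == x)).count a :=
          pv_count_tail x a t hax
        have hmemd : a ∈ t.dropWhile (fun y => y == x) := by
          by_contra hnot
          have h0 : (t.dropWhile (fun y => y == x)).count a = 0 := List.count_eq_zero.mpr hnot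
          omega
        exact ⟨hmemd, by omega, by rw [← hc]; exact hval⟩

theorem pv_runs_pairwise (s : List Int) (hs : s.Pairwise (· ≤ ·)) :
    (pvRuns s).Pairwise (fun p q => p.1 < q.1) := by
  induction s using pvRuns.induct with
  | case1 => simp [pvRuns]
  | case2 x t ih =>
    have htp : t.Pairwise (· ≤ ·) := hs.of_cons
    have ht2 : (t.dropWhile (fun y => y == x)).Pairwise (· ≤ ·) :=
      htp.sublist (t.dropWhile_sublist _)
    have hxlt : ∀ k ∈ t.dropWhile (fun y => y == x), x < k := by
      intro k hk
      have hkt : k ∈ t := (t.dropWhile_sublist _).mem hk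
      have hle : x ≤ k := (List.pairwise_cons.mp hs).1 k hkt
      have hne : k ≠ x := fun h => pv_mem_dropWhile_ne x t htp (List.pairwise_cons.mp hs).1 (h ▸ hk)
      exact lt_of_le_of_ne hle (Ne.symm hne)
    rw [pvRuns]
    apply List.pairwise_append.mpr
    refine ⟨?_, ih ht2, ?_⟩
    · split <;> simp
    · intro p hp q hq
      have hq1 : q.1 ∈ t.dropWhile (fun y => y == x) :=
        ((pv_mem_runs _ ht2 q).mp hq).1
      have hp1 : p.1 = x := by
        split at hp
        · rw [List.mem_singleton] at hp; rw [hp]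
        · simp at hp
      rw [hp1]
      exact hxlt _ hq1

-- insertBy only compares elements already in the list with the inserted one
theorem pv_insertBy_congr (p q : Int × Int → Int × Int → Bool) (x : Int × Int) :
    ∀ (ys : List (Int × Int)), (∀ y ∈ ys, p x y = q x y) →
    PySem.List.insertBy p x ys = PySem.List.insertBy q x ys := by
  intro ys
  induction ys with
  | nil => intro _; rfl
  | cons y ys ih =>
    intro h
    have hy : p x y = q x y := h y List.mem_cons_self
    simp only [PySem.List.insertBy, hy]
    split
    · rfl
    · rw [List.cons_inj_right]
      exact ih (fun z hz => h z (List.mem_cons_of_mem _ hz))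

theorem pv_foldl_insertBy_congr (p q : Int × Int → Int × Int → Bool) :
    ∀ (l acc : List (Int × Int)),
    (∀ x, (x ∈ l ∨ x ∈ acc) → ∀ y, (y ∈ l ∨ y ∈ acc) → p x y = q x y) →
    l.foldl (fun a x => PySem.List.insertBy p x a) acc
      = l.foldl (fun a x => PySem.List.insertBy q x a) acc := by
  intro l
  induction l with
  | nil => intro acc _; rfl
  | cons x l ih =>
    intro acc h
    simp only [List.foldl_cons]
    have hstep : PySem.List.insertBy p x acc = PySem.List.insertBy q x acc :=
      pv_insertBy_congr p q x acc
        (fun y hy => h x (Or.inl List.mem_cons_self) y (Or.inr hy))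
    rw [hstep]
    apply ih
    intro a ha b hb
    have hmem : ∀ z, z ∈ l ∨ z ∈ PySem.List.insertBy q x acc → z ∈ x :: l ∨ z ∈ acc := by
      intro z hz
      rcases hz with hz | hz
      · exact Or.inl (List.mem_cons_of_mem _ hz)
      · rcases (PySem.List.mem_insertBy q x z acc).mp hz with hz | hz
        · exact Or.inl (hz ▸ List.mem_cons_self)
        · exact Or.inr hz
    exact h a (hmem a ha) b (hmem b hb)

-- Python's tuple sort equals sort-by-first-component when first components determine elements
theorem pv_sorted2_eq (pkt ys : List (Int × Int))
    (hkey : ∀ a ∈ pkt, ∀ b ∈ pkt, a.1 = b.1 → a = b)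
    (hperm : ys.Perm pkt) (hys : ys.Pairwise (fun a b => a.1 < b.1)) :
    PySem.List.sorted2 pkt (fun p => p.1) (fun p => p.2) = ys := by
  have h1 : PySem.List.sorted2 pkt (fun p => p.1) (fun p => p.2)
      = PySem.List.sorted pkt (fun p => p.1) := by
    rw [PySem.List.sorted_eq_foldl_insertBy]
    simp only [PySem.List.sorted2]
    apply pv_foldl_insertBy_congr
    intro a ha b hb
    simp only [List.mem_nil_iff, or_false] at ha hb
    by_cases hab : a.1 = b.1
    · have : a = b := hkey a ha b hb hab
      subst this
      simp
    · rcases lt_or_gt_of_ne hab with h | h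
      · simp [h, not_lt_of_gt h]
      · simp [h, not_lt_of_gt h]
  rw [h1]
  exact PySem.List.sorted_eq_of_perm_of_pairwise_lt pkt ys (fun p => p.1) hperm hys

-- ===== VERDICT (by name: the statement is the Claim_ definition above) =====
theorem packet_retransmissions_spec : Claim_equal_packet_retransmissions := by
  intro xs _
  unfold Spec_packet_retransmissions packet_retransmissions packet_retransmissions_alt
  simp only [List.map_id']
  -- name the sorted input and its facts
  set s := PySem.List.sorted xs (fun x => x) with hsdef
  have hsperm : s.Perm xs := PySem.List.sorted_perm xs (fun x => x) false
  have hsord : s.Pairwise (· ≤ ·) := by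
    have := PySem.List.sorted_pairwise xs (fun x => x)
    simpa using this
  have hcount : ∀ k, s.count k = xs.count k := fun k => hsperm.count_eq k
  -- A's intermediate list
  rw [pv_items_foldA, pv_filter_loop, List.filter_map]
  set f : Int → Int × Int := fun k => (k, (-1 : Int) + xs.count k) with hf
  set pkt := ((PySem.Set.ofList xs).filter
      ((fun p : Int × Int => decide (p.2 ≠ 0)) ∘ f)).map f with hpkt
  -- key determines element in pkt
  have hkey : ∀ a ∈ pkt, ∀ b ∈ pkt, a.1 = b.1 → a = b := by
    intro a ha b hb hab
    obtain ⟨ka, _, hka⟩ := List.mem_map.mp ha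
    obtain ⟨kb, _, hkb⟩ := List.mem_map.mp hb
    rw [← hka, ← hkb] at hab ⊢
    simp only [hf] at hab ⊢
    rw [hab]
  -- B's result is strictly increasing in the key and a permutation of pkt
  have hpw : (pvRuns s).Pairwise (fun p q => p.1 < q.1) := pv_runs_pairwise s hsord
  have hnodupB : (pvRuns s).Nodup :=
    hpw.imp (fun h => by intro he; rw [he] at h; exact lt_irrefl _ h)
  have hnodupP : pkt.Nodup := by
    apply List.Nodup.map
    · intro a b hab
      simpa [hf] using congrArg Prod.fst hab
    · exact ((PySem.Set.nodup_ofList xs).filter _)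
  have hperm : (pvRuns s).Perm pkt := by
    rw [List.perm_ext_iff_of_nodup hnodupB hnodupP]
    intro p
    rw [pv_mem_runs s hsord p]
    constructor
    · rintro ⟨hmem, hcnt, hval⟩
      apply List.mem_map.mpr
      refine ⟨p.1, ?_, ?_⟩
      · apply List.mem_filter.mpr
        constructor
        · exact (PySem.Set.mem_ofList xs p.1).mpr (hsperm.mem_iff.mp hmem)
        · simp only [Function.comp_apply, hf, decide_eq_true_eq]
          rw [hcount] at hcnt
          omega
      · refine Prod.ext_iff.mpr ⟨rfl, ?_⟩
        simp only [hf]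
        rw [hcount] at hval
        omega
    · intro hp
      obtain ⟨k, hkf, hkp⟩ := List.mem_map.mp hp
      obtain ⟨hkmem, hkval⟩ := List.mem_filter.mp hkf
      simp only [Function.comp_apply, hf, decide_eq_true_eq] at hkval
      have hkxs : k ∈ xs := (PySem.Set.mem_ofList xs k).mp hkmem
      have hkpos : 0 < xs.count k := List.count_pos_iff.mpr hkxs
      have hp1 : p.1 = k := by rw [← hkp]
      have hp2 : p.2 = (-1 : Int) + xs.count k := by rw [← hkp]
      refine ⟨?_, ?_, ?_⟩
      · rw [hp1]; exact hsperm.mem_iff.mpr hkxs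
      · rw [hp1, hcount]; omega
      · rw [hp1, hcount, hp2]; omega
  exact pv_sorted2_eq pkt (pvRuns s) hkey hperm hpw
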